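-- pv_equiv track=rewrite | github.com/watsongoiano/evidens.digital | src/routes/checkup.py | get_population_specific_recommendations
-- ===== SOURCE A (Python) =====
-- def get_population_specific_recommendations(idade, sexo, comorbidades):
--     """Rastreamentos específicos por população"""
--     recomendacoes = []
--
--     # HIV - todos 15-65 anos
--     if 15 <= idade <= 65:
--         recomendacoes.append({
--             'titulo': 'Teste HIV',
--             'descricao': 'Rastreamento de HIV pelo menos uma vez na vida',
--             'prioridade': 'alta',
--             'categoria': 'rastreamento_ist',
--             'referencia': 'USPSTF Grau A'
--         })
--
--     # Sífilis - populações de risco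
--     if idade >= 15:
--         recomendacoes.append({
--             'titulo': 'Teste de Sífilis',
--             'descricao': 'VDRL/RPR se risco aumentado (múltiplos parceiros, HSH, HIV+)',
--             'prioridade': 'media',
--             'categoria': 'rastreamento_ist',
--             'referencia': 'USPSTF Grau A'
--         })
--
--     # Gonorreia e Clamídia - mulheres jovens
--     if sexo == 'feminino' and idade <= 24:
--         recomendacoes.append({
--             'titulo': 'Rastreamento Gonorreia/Clamídia',
--             'descricao': 'Teste anual se sexualmente ativa',
--             'prioridade': 'alta',
--             'categoria': 'rastreamento_ist',
--             'referencia': 'USPSTF Grau B'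
--         })
--     elif sexo == 'feminino' and idade >= 25:
--         recomendacoes.append({
--             'titulo': 'Rastreamento Gonorreia/Clamídia',
--             'descricao': 'Teste se risco aumentado (múltiplos parceiros, novo parceiro)',
--             'prioridade': 'media',
--             'categoria': 'rastreamento_ist',
--             'referencia': 'USPSTF Grau B'
--         })
--
--     # Hepatite C - todos 18-79 anos
--     if 18 <= idade <= 79:
--         recomendacoes.append({
--             'titulo': 'Teste Hepatite C',
--             'descricao': 'Anti-HCV pelo menos uma vez na vida',
--             'prioridade': 'alta',
--             'categoria': 'rastreamento_hepatite',
--             'referencia': 'USPSTF Grau B'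
--         })
--
--     # Depressão - todos adultos
--     if idade >= 18:
--         recomendacoes.append({
--             'titulo': 'Rastreamento de Depressão',
--             'descricao': 'PHQ-2 ou PHQ-9 anual',
--             'prioridade': 'alta',
--             'categoria': 'saude_mental',
--             'referencia': 'USPSTF Grau B'
--         })
--
--     # Ansiedade - adultos 19-64 anos
--     if 19 <= idade <= 64:
--         recomendacoes.append({
--             'titulo': 'Rastreamento de Ansiedade',
--             'descricao': 'GAD-2 ou GAD-7 conforme indicação clínica',
--             'prioridade': 'media',
--             'categoria': 'saude_mental',
--             'referencia': 'USPSTF Grau B'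
--         })
--
--     # Abuso de álcool - todos adultos
--     if idade >= 18:
--         recomendacoes.append({
--             'titulo': 'Rastreamento Abuso de Álcool',
--             'descricao': 'AUDIT-C ou questionário similar',
--             'prioridade': 'media',
--             'categoria': 'uso_substancias',
--             'referencia': 'USPSTF Grau B'
--         })
--
--     # Diabetes - adultos com fatores de risco
--     if idade >= 35 or any(c in comorbidades for c in ['hipertensao', 'obesidade']):
--         recomendacoes.append({
--             'titulo': 'Rastreamento de Diabetes',
--             'descricao': 'Glicemia de jejum, HbA1c ou TOTG a cada 3 anos',
--             'prioridade': 'alta',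
--             'categoria': 'rastreamento_metabolico',
--             'referencia': 'USPSTF Grau B'
--         })
--
--     return recomendacoes
-- ===== SOURCE B (Python) =====
-- # B: precompute a lookup table indexed by (age band, is-female, has-risk-comorbidity)
-- # at module load; the function itself just classifies the age into a band and
-- # returns a copy of the precomputed list -- no guard is evaluated per call.
--
-- _BREAKS = (15, 18, 19, 25, 35, 65, 66, 80)   # ages at which some guard changes value
-- _REPS = (0, 15, 18, 19, 25, 35, 65, 66, 80)  # one representative age per band
--
-- _RECS = {
--     'hiv': {'titulo': 'Teste HIV',
--             'descricao': 'Rastreamento de HIV pelo menos uma vez na vida',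
--             'prioridade': 'alta', 'categoria': 'rastreamento_ist',
--             'referencia': 'USPSTF Grau A'},
--     'sifilis': {'titulo': 'Teste de Sífilis',
--                 'descricao': 'VDRL/RPR se risco aumentado (múltiplos parceiros, HSH, HIV+)',
--                 'prioridade': 'media', 'categoria': 'rastreamento_ist',
--                 'referencia': 'USPSTF Grau A'},
--     'gc_jovem': {'titulo': 'Rastreamento Gonorreia/Clamídia',
--                  'descricao': 'Teste anual se sexualmente ativa',
--                  'prioridade': 'alta', 'categoria': 'rastreamento_ist',
--                  'referencia': 'USPSTF Grau B'},
--     'gc_adulta': {'titulo': 'Rastreamento Gonorreia/Clamídia',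
--                   'descricao': 'Teste se risco aumentado (múltiplos parceiros, novo parceiro)',
--                   'prioridade': 'media', 'categoria': 'rastreamento_ist',
--                   'referencia': 'USPSTF Grau B'},
--     'hepc': {'titulo': 'Teste Hepatite C',
--              'descricao': 'Anti-HCV pelo menos uma vez na vida',
--              'prioridade': 'alta', 'categoria': 'rastreamento_hepatite',
--              'referencia': 'USPSTF Grau B'},
--     'depressao': {'titulo': 'Rastreamento de Depressão',
--                   'descricao': 'PHQ-2 ou PHQ-9 anual',
--                   'prioridade': 'alta', 'categoria': 'saude_mental',
--                   'referencia': 'USPSTF Grau B'},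
--     'ansiedade': {'titulo': 'Rastreamento de Ansiedade',
--                   'descricao': 'GAD-2 ou GAD-7 conforme indicação clínica',
--                   'prioridade': 'media', 'categoria': 'saude_mental',
--                   'referencia': 'USPSTF Grau B'},
--     'alcool': {'titulo': 'Rastreamento Abuso de Álcool',
--                'descricao': 'AUDIT-C ou questionário similar',
--                'prioridade': 'media', 'categoria': 'uso_substancias',
--                'referencia': 'USPSTF Grau B'},
--     'diabetes': {'titulo': 'Rastreamento de Diabetes',
--                  'descricao': 'Glicemia de jejum, HbA1c ou TOTG a cada 3 anos',
--                  'prioridade': 'alta', 'categoria': 'rastreamento_metabolico',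
--                  'referencia': 'USPSTF Grau B'},
-- }
--
--
-- def _build(rep, fem, risk):
--     """List of recommendations for any age in the band of rep, given the two flags."""
--     out = []
--     if 15 <= rep <= 65:
--         out.append(_RECS['hiv'])
--     if rep >= 15:
--         out.append(_RECS['sifilis'])
--     if fem and rep <= 24:
--         out.append(_RECS['gc_jovem'])
--     elif fem and rep >= 25:
--         out.append(_RECS['gc_adulta'])
--     if 18 <= rep <= 79:
--         out.append(_RECS['hepc'])
--     if rep >= 18:
--         out.append(_RECS['depressao'])
--     if 19 <= rep <= 64:
--         out.append(_RECS['ansiedade'])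
--     if rep >= 18:
--         out.append(_RECS['alcool'])
--     if rep >= 35 or risk:
--         out.append(_RECS['diabetes'])
--     return out
--
--
-- _TABLE = tuple(tuple(tuple(_build(rep, fem, risk) for risk in (False, True))
--                      for fem in (False, True))
--                for rep in _REPS)
--
--
-- def get_population_specific_recommendations(idade, sexo, comorbidades):
--     """Rastreamentos específicos por população (precomputed band-table lookup)."""
--     band = sum(b <= idade for b in _BREAKS)
--     fem = sexo == 'feminino'
--     risk = 'hipertensao' in comorbidades or 'obesidade' in comorbidades
--     return [dict(r) for r in _TABLE[band][int(fem)][int(risk)]]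
-- ===== Notes on version B (the rewrite author's own statement) =====
-- stated objective: alternative
-- what changed: Replaces the per-call chain of nine guard evaluations with a lookup table precomputed at module load and indexed by (age band, female flag, risk-comorbidity flag): the call classifies idade into one of nine bands delimited by the ages where any guard changes and returns a copy of the precomputed list.
import Mathlib
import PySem

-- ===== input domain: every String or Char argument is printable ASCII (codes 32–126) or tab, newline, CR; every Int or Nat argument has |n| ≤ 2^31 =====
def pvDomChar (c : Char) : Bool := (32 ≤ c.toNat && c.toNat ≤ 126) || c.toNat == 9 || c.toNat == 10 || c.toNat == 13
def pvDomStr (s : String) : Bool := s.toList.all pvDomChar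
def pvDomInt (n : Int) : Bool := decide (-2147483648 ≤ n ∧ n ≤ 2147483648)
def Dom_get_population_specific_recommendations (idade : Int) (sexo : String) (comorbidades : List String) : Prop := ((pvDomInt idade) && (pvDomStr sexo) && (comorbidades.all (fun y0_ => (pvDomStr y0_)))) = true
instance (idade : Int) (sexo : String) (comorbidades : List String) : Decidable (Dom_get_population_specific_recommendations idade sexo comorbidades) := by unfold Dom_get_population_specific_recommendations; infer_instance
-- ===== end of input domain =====

-- B replaces A's per-call chain of nine guards by a table precomputed once and indexed
-- by (age band, female flag, risk flag); objective: alternative structure, same output.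

-- ===== PORT A =====
-- the record literals (the dict literals of A, shared by B's table builder)
def recHIV : List (String × String) :=
  [("titulo", "Teste HIV"), ("descricao", "Rastreamento de HIV pelo menos uma vez na vida"),
   ("prioridade", "alta"), ("categoria", "rastreamento_ist"), ("referencia", "USPSTF Grau A")]
def recSifilis : List (String × String) :=
  [("titulo", "Teste de Sífilis"), ("descricao", "VDRL/RPR se risco aumentado (múltiplos parceiros, HSH, HIV+)"),
   ("prioridade", "media"), ("categoria", "rastreamento_ist"), ("referencia", "USPSTF Grau A")]
def recGCjovem : List (String × String) :=
  [("titulo", "Rastreamento Gonorreia/Clamídia"), ("descricao", "Teste anual se sexualmente ativa"),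
   ("prioridade", "alta"), ("categoria", "rastreamento_ist"), ("referencia", "USPSTF Grau B")]
def recGCadulta : List (String × String) :=
  [("titulo", "Rastreamento Gonorreia/Clamídia"), ("descricao", "Teste se risco aumentado (múltiplos parceiros, novo parceiro)"),
   ("prioridade", "media"), ("categoria", "rastreamento_ist"), ("referencia", "USPSTF Grau B")]
def recHepC : List (String × String) :=
  [("titulo", "Teste Hepatite C"), ("descricao", "Anti-HCV pelo menos uma vez na vida"),
   ("prioridade", "alta"), ("categoria", "rastreamento_hepatite"), ("referencia", "USPSTF Grau B")]
def recDepressao : List (String × String) :=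
  [("titulo", "Rastreamento de Depressão"), ("descricao", "PHQ-2 ou PHQ-9 anual"),
   ("prioridade", "alta"), ("categoria", "saude_mental"), ("referencia", "USPSTF Grau B")]
def recAnsiedade : List (String × String) :=
  [("titulo", "Rastreamento de Ansiedade"), ("descricao", "GAD-2 ou GAD-7 conforme indicação clínica"),
   ("prioridade", "media"), ("categoria", "saude_mental"), ("referencia", "USPSTF Grau B")]
def recAlcool : List (String × String) :=
  [("titulo", "Rastreamento Abuso de Álcool"), ("descricao", "AUDIT-C ou questionário similar"),
   ("prioridade", "media"), ("categoria", "uso_substancias"), ("referencia", "USPSTF Grau B")]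
def recDiabetes : List (String × String) :=
  [("titulo", "Rastreamento de Diabetes"), ("descricao", "Glicemia de jejum, HbA1c ou TOTG a cada 3 anos"),
   ("prioridade", "alta"), ("categoria", "rastreamento_metabolico"), ("referencia", "USPSTF Grau B")]

def get_population_specific_recommendations (idade : Int) (sexo : String) (comorbidades : List String) : List (List (String × String)) :=
  let recomendacoes : List (List (String × String)) := []
  let recomendacoes := if 15 ≤ idade ∧ idade ≤ 65 then recomendacoes ++ [recHIV] else recomendacoes
  let recomendacoes := if 15 ≤ idade then recomendacoes ++ [recSifilis] else recomendacoes
  let recomendacoes :=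
    if sexo = "feminino" ∧ idade ≤ 24 then recomendacoes ++ [recGCjovem]
    else if sexo = "feminino" ∧ 25 ≤ idade then recomendacoes ++ [recGCadulta]
    else recomendacoes
  let recomendacoes := if 18 ≤ idade ∧ idade ≤ 79 then recomendacoes ++ [recHepC] else recomendacoes
  let recomendacoes := if 18 ≤ idade then recomendacoes ++ [recDepressao] else recomendacoes
  let recomendacoes := if 19 ≤ idade ∧ idade ≤ 64 then recomendacoes ++ [recAnsiedade] else recomendacoes
  let recomendacoes := if 18 ≤ idade then recomendacoes ++ [recAlcool] else recomendacoes
  let recomendacoes :=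
    if 35 ≤ idade ∨ (["hipertensao", "obesidade"].any (fun c => comorbidades.contains c)) = true
    then recomendacoes ++ [recDiabetes] else recomendacoes
  recomendacoes

-- ===== PORT B =====
-- the ages at which some guard changes value, and one representative age per band
def pvBreaks : List Int := [15, 18, 19, 25, 35, 65, 66, 80]
def pvReps : List Int := [0, 15, 18, 19, 25, 35, 65, 66, 80]

-- Source B's _build: the list for any age in rep's band, given the two flags
def pvBuild (rep : Int) (fem risk : Bool) : List (List (String × String)) :=
  let out : List (List (String × String)) := []
  let out := if 15 ≤ rep ∧ rep ≤ 65 then out ++ [recHIV] else out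
  let out := if 15 ≤ rep then out ++ [recSifilis] else out
  let out :=
    if fem ∧ rep ≤ 24 then out ++ [recGCjovem]
    else if fem ∧ 25 ≤ rep then out ++ [recGCadulta]
    else out
  let out := if 18 ≤ rep ∧ rep ≤ 79 then out ++ [recHepC] else out
  let out := if 18 ≤ rep then out ++ [recDepressao] else out
  let out := if 19 ≤ rep ∧ rep ≤ 64 then out ++ [recAnsiedade] else out
  let out := if 18 ≤ rep then out ++ [recAlcool] else out
  let out := if 35 ≤ rep ∨ risk then out ++ [recDiabetes] else out
  out

-- Source B's _TABLE, built once: band → fem (0/1) → risk (0/1) → list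
def pvTable : List (List (List (List (List (String × String))))) :=
  pvReps.map (fun rep => [false, true].map (fun fem => [false, true].map (fun risk => pvBuild rep fem risk)))

def get_population_specific_recommendations_alt (idade : Int) (sexo : String) (comorbidades : List String) : List (List (String × String)) :=
  let band : Nat := pvBreaks.countP (fun b => b ≤ idade)
  let fem : Bool := sexo == "feminino"
  let risk : Bool := comorbidades.contains "hipertensao" || comorbidades.contains "obesidade"
  (((pvTable.getD band []).getD (cond fem 1 0) []).getD (cond risk 1 0) [])

-- ===== PRECONDITION & SPEC =====
def Spec_get_population_specific_recommendations (idade : Int) (sexo : String) (comorbidades : List String) (out : List (List (String × String))) : Prop := out = get_population_specific_recommendations_alt idade sexo comorbidades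
instance (idade : Int) (sexo : String) (comorbidades : List String) (out : List (List (String × String))) : Decidable (Spec_get_population_specific_recommendations idade sexo comorbidades out) := by unfold Spec_get_population_specific_recommendations; infer_instance

-- ===== CLAIM (what is proved, stated in full; the proofs are below) =====
def Claim_equal_get_population_specific_recommendations : Prop := ∀ (idade : Int) (sexo : String) (comorbidades : List String), Dom_get_population_specific_recommendations idade sexo comorbidades → Spec_get_population_specific_recommendations idade sexo comorbidades (get_population_specific_recommendations idade sexo comorbidades)

-- ===== LEMMAS AND PROOFS =====

-- looking up the table at band k gives _build at the k-th representative age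
set_option maxHeartbeats 1000000 in
theorem pv_alt_eq_build (idade : Int) (sexo : String) (comorbidades : List String)
    (k : Nat) (rep : Int) (hk : pvBreaks.countP (fun b => b ≤ idade) = k)
    (hr : pvReps.getD k 0 = rep) (hlt : k < 9) :
    get_population_specific_recommendations_alt idade sexo comorbidades
      = pvBuild rep (sexo == "feminino")
          (comorbidades.contains "hipertensao" || comorbidades.contains "obesidade") := by
  subst hr
  simp only [get_population_specific_recommendations_alt]
  rw [hk]
  generalize (sexo == "feminino") = f
  generalize (comorbidades.contains "hipertensao" || comorbidades.contains "obesidade") = r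
  interval_cases k <;> cases f <;> cases r <;> rfl

-- A's chain equals _build at rep when every atomic age guard agrees between idade and rep
set_option maxHeartbeats 1000000 in
theorem pv_a_eq_build (idade rep : Int) (sexo : String) (comorbidades : List String)
    (hA : 15 ≤ idade ↔ 15 ≤ rep) (hB : idade ≤ 65 ↔ rep ≤ 65)
    (hC : idade ≤ 24 ↔ rep ≤ 24) (hD : 25 ≤ idade ↔ 25 ≤ rep)
    (hE : 18 ≤ idade ↔ 18 ≤ rep) (hF : idade ≤ 79 ↔ rep ≤ 79)
    (hG : 19 ≤ idade ↔ 19 ≤ rep) (hH : idade ≤ 64 ↔ rep ≤ 64)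
    (hI : 35 ≤ idade ↔ 35 ≤ rep) :
    get_population_specific_recommendations idade sexo comorbidades
      = pvBuild rep (sexo == "feminino")
          (comorbidades.contains "hipertensao" || comorbidades.contains "obesidade") := by
  unfold get_population_specific_recommendations pvBuild
  simp only [hA, hB, hC, hD, hE, hF, hG, hH, hI, beq_iff_eq, List.any_cons, List.any_nil,
    Bool.or_false, Bool.or_eq_true]

-- ===== VERDICT (by name: the statement is the Claim_ definition above) =====
set_option maxHeartbeats 1000000 in
theorem get_population_specific_recommendations_spec : Claim_equal_get_population_specific_recommendations := by
  intro idade sexo comorbidades _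
  unfold Spec_get_population_specific_recommendations
  by_cases c0 : idade < 15
  · have hk : pvBreaks.countP (fun b => b ≤ idade) = 0 := by
      simp [pvBreaks, show ¬(15:Int) ≤ idade from by omega, show ¬(18:Int) ≤ idade from by omega, show ¬(19:Int) ≤ idade from by omega, show ¬(25:Int) ≤ idade from by omega, show ¬(35:Int) ≤ idade from by omega, show ¬(65:Int) ≤ idade from by omega, show ¬(66:Int) ≤ idade from by omega, show ¬(80:Int) ≤ idade from by omega]
    rw [pv_alt_eq_build idade sexo comorbidades 0 0 hk rfl (by omega)]
    exact pv_a_eq_build idade 0 sexo comorbidades (by omega) (by omega) (by omega) (by omega) (by omega) (by omega) (by omega) (by omega) (by omega)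
  by_cases c1 : idade < 18
  · have hk : pvBreaks.countP (fun b => b ≤ idade) = 1 := by
      simp [pvBreaks, show (15:Int) ≤ idade from by omega, show ¬(18:Int) ≤ idade from by omega, show ¬(19:Int) ≤ idade from by omega, show ¬(25:Int) ≤ idade from by omega, show ¬(35:Int) ≤ idade from by omega, show ¬(65:Int) ≤ idade from by omega, show ¬(66:Int) ≤ idade from by omega, show ¬(80:Int) ≤ idade from by omega]
    rw [pv_alt_eq_build idade sexo comorbidades 1 15 hk rfl (by omega)]
    exact pv_a_eq_build idade 15 sexo comorbidades (by omega) (by omega) (by omega) (by omega) (by omega) (by omega) (by omega) (by omega) (by omega)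
  by_cases c2 : idade < 19
  · have hk : pvBreaks.countP (fun b => b ≤ idade) = 2 := by
      simp [pvBreaks, show (15:Int) ≤ idade from by omega, show (18:Int) ≤ idade from by omega, show ¬(19:Int) ≤ idade from by omega, show ¬(25:Int) ≤ idade from by omega, show ¬(35:Int) ≤ idade from by omega, show ¬(65:Int) ≤ idade from by omega, show ¬(66:Int) ≤ idade from by omega, show ¬(80:Int) ≤ idade from by omega]
    rw [pv_alt_eq_build idade sexo comorbidades 2 18 hk rfl (by omega)]
    exact pv_a_eq_build idade 18 sexo comorbidades (by omega) (by omega) (by omega) (by omega) (by omega) (by omega) (by omega) (by omega) (by omega)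
  by_cases c3 : idade < 25
  · have hk : pvBreaks.countP (fun b => b ≤ idade) = 3 := by
      simp [pvBreaks, show (15:Int) ≤ idade from by omega, show (18:Int) ≤ idade from by omega, show (19:Int) ≤ idade from by omega, show ¬(25:Int) ≤ idade from by omega, show ¬(35:Int) ≤ idade from by omega, show ¬(65:Int) ≤ idade from by omega, show ¬(66:Int) ≤ idade from by omega, show ¬(80:Int) ≤ idade from by omega]
    rw [pv_alt_eq_build idade sexo comorbidades 3 19 hk rfl (by omega)]
    exact pv_a_eq_build idade 19 sexo comorbidades (by omega) (by omega) (by omega) (by omega) (by omega) (by omega) (by omega) (by omega) (by omega)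
  by_cases c4 : idade < 35
  · have hk : pvBreaks.countP (fun b => b ≤ idade) = 4 := by
      simp [pvBreaks, show (15:Int) ≤ idade from by omega, show (18:Int) ≤ idade from by omega, show (19:Int) ≤ idade from by omega, show (25:Int) ≤ idade from by omega, show ¬(35:Int) ≤ idade from by omega, show ¬(65:Int) ≤ idade from by omega, show ¬(66:Int) ≤ idade from by omega, show ¬(80:Int) ≤ idade from by omega]
    rw [pv_alt_eq_build idade sexo comorbidades 4 25 hk rfl (by omega)]
    exact pv_a_eq_build idade 25 sexo comorbidades (by omega) (by omega) (by omega) (by omega) (by omega) (by omega) (by omega) (by omega) (by omega)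
  by_cases c5 : idade < 65
  · have hk : pvBreaks.countP (fun b => b ≤ idade) = 5 := by
      simp [pvBreaks, show (15:Int) ≤ idade from by omega, show (18:Int) ≤ idade from by omega, show (19:Int) ≤ idade from by omega, show (25:Int) ≤ idade from by omega, show (35:Int) ≤ idade from by omega, show ¬(65:Int) ≤ idade from by omega, show ¬(66:Int) ≤ idade from by omega, show ¬(80:Int) ≤ idade from by omega]
    rw [pv_alt_eq_build idade sexo comorbidades 5 35 hk rfl (by omega)]
    exact pv_a_eq_build idade 35 sexo comorbidades (by omega) (by omega) (by omega) (by omega) (by omega) (by omega) (by omega) (by omega) (by omega)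
  by_cases c6 : idade < 66
  · have hk : pvBreaks.countP (fun b => b ≤ idade) = 6 := by
      simp [pvBreaks, show (15:Int) ≤ idade from by omega, show (18:Int) ≤ idade from by omega, show (19:Int) ≤ idade from by omega, show (25:Int) ≤ idade from by omega, show (35:Int) ≤ idade from by omega, show (65:Int) ≤ idade from by omega, show ¬(66:Int) ≤ idade from by omega, show ¬(80:Int) ≤ idade from by omega]
    rw [pv_alt_eq_build idade sexo comorbidades 6 65 hk rfl (by omega)]
    exact pv_a_eq_build idade 65 sexo comorbidades (by omega) (by omega) (by omega) (by omega) (by omega) (by omega) (by omega) (by omega) (by omega)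
  by_cases c7 : idade < 80
  · have hk : pvBreaks.countP (fun b => b ≤ idade) = 7 := by
      simp [pvBreaks, show (15:Int) ≤ idade from by omega, show (18:Int) ≤ idade from by omega, show (19:Int) ≤ idade from by omega, show (25:Int) ≤ idade from by omega, show (35:Int) ≤ idade from by omega, show (65:Int) ≤ idade from by omega, show (66:Int) ≤ idade from by omega, show ¬(80:Int) ≤ idade from by omega]
    rw [pv_alt_eq_build idade sexo comorbidades 7 66 hk rfl (by omega)]
    exact pv_a_eq_build idade 66 sexo comorbidades (by omega) (by omega) (by omega) (by omega) (by omega) (by omega) (by omega) (by omega) (by omega)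
  · have hk : pvBreaks.countP (fun b => b ≤ idade) = 8 := by
      simp [pvBreaks, show (15:Int) ≤ idade from by omega, show (18:Int) ≤ idade from by omega, show (19:Int) ≤ idade from by omega, show (25:Int) ≤ idade from by omega, show (35:Int) ≤ idade from by omega, show (65:Int) ≤ idade from by omega, show (66:Int) ≤ idade from by omega, show (80:Int) ≤ idade from by omega]
    rw [pv_alt_eq_build idade sexo comorbidades 8 80 hk rfl (by omega)]
    exact pv_a_eq_build idade 80 sexo comorbidades (by omega) (by omega) (by omega) (by omega) (by omega) (by omega) (by omega) (by omega) (by omega)
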